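-- pv_equiv track=rewrite | github.com/kryptops/lycanthropy | svc/lycanthropy/sql/security.py | chkAcid
-- ===== SOURCE A (Python) =====
-- def chkAcid(acid):
--     acidLegals = 'ABCDEFGHIJKLMNOPQRSTUVWXYZ0123456789'
--     if len(acid) == 8:
--         for ch in acid:
--             if ch not in acidLegals:
--                 return False
--         return True
--     else:
--         return False
-- ===== SOURCE B (Python) =====
-- import re
--
-- _ACID_RE = re.compile(r'[A-Z0-9]{8}')
--
-- def chkAcid(acid):
--     return bool(_ACID_RE.fullmatch(acid))
-- ===== Notes on version B (the rewrite author's own statement) =====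
-- stated objective: idiomatic
-- what changed: Replaced the explicit length check plus per-character membership loop with a single anchored regular-expression full match r'[A-Z0-9]{8}' coerced to bool.
import Mathlib
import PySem

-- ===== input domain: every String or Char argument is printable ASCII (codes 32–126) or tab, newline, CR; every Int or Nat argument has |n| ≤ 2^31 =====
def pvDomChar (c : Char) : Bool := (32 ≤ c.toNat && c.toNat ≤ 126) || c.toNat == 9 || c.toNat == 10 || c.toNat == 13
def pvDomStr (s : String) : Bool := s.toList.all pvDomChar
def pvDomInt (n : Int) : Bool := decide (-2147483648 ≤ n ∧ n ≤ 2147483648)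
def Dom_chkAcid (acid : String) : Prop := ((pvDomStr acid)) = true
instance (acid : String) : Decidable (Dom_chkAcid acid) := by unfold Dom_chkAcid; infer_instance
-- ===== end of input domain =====

-- ===== PORT A =====
-- B replaces A's length check + membership loop with an anchored regex full match (return value only).
def chkAcidLoop (legals : List Char) : List Char → Bool
  | [] => true
  | ch :: rest => if !(legals.contains ch) then false else chkAcidLoop legals rest

def chkAcid (acid : String) : Bool :=
  let acidLegals := "ABCDEFGHIJKLMNOPQRSTUVWXYZ0123456789"
  if PySem.Str.len acid = 8 then chkAcidLoop acidLegals.toList acid.toList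
  else false

-- ===== PORT B =====
-- port of re.fullmatch(r'[A-Z0-9]{8}', acid): consume exactly 8 characters of the class, then require end of input
def reClassCount (cls : List Char) : Nat → List Char → Bool
  | 0, [] => true
  | 0, _ :: _ => false
  | _ + 1, [] => false
  | n + 1, c :: rest => if cls.contains c then reClassCount cls n rest else false

def chkAcid_alt (acid : String) : Bool :=
  reClassCount "ABCDEFGHIJKLMNOPQRSTUVWXYZ0123456789".toList 8 acid.toList

-- ===== PRECONDITION & SPEC =====
def Spec_chkAcid (acid : String) (out : Bool) : Prop := out = chkAcid_alt acid
instance (acid : String) (out : Bool) : Decidable (Spec_chkAcid acid out) := by unfold Spec_chkAcid; infer_instance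

-- ===== CLAIM (what is proved, stated in full; the proofs are below) =====
def Claim_equal_chkAcid : Prop := ∀ (acid : String), Dom_chkAcid acid → Spec_chkAcid acid (chkAcid acid)

-- ===== LEMMAS AND PROOFS =====
theorem reClassCount_eq (cls : List Char) (n : Nat) (l : List Char) :
    reClassCount cls n l = (decide (l.length = n) && chkAcidLoop cls l) := by
  induction l generalizing n with
  | nil => cases n <;> simp [reClassCount, chkAcidLoop]
  | cons c rest ih =>
    cases n with
    | zero => simp [reClassCount]
    | succ m =>
      simp only [reClassCount, chkAcidLoop, ih]
      by_cases h : cls.contains c = true <;> simp [Bool.and_left_comm]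

-- ===== VERDICT (by name: the statement is the Claim_ definition above) =====
theorem chkAcid_spec : Claim_equal_chkAcid := by
  intro acid _
  unfold Spec_chkAcid chkAcid chkAcid_alt
  rw [reClassCount_eq]
  simp only [PySem.Str.len_eq, String.length_toList]
  by_cases h : acid.length = 8
  · have h' : ((acid.length : Int) = 8) := by exact_mod_cast h
    simp [h]
  · have h' : ¬((acid.length : Int) = 8) := by exact_mod_cast h
    simp [h, h']
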